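-- pv_equiv track=rewrite | github.com/alexneault/MATH20609 | tp2/allocation.py | resource_allocation_dp
-- ===== SOURCE A (Python) =====
-- def resource_allocation_dp(resources: int, benefit_matrix: list[list[int]], resources_matrix: list[list[int]]) -> tuple[int, list[int]]:
--     tasks = len(benefit_matrix)
--     dp = [[-1] * (resources + 1) for _ in range(tasks)]
--     allocation = [[0] * (resources + 1) for _ in range(tasks)]
--
--     for r in range(resources + 1):
--         for k, cost in enumerate(resources_matrix[0]):
--             if cost <= r and cost >= 1:  # Ensure at least 1 block
--                 dp[0][r] = max(dp[0][r], benefit_matrix[0][k])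
--                 if dp[0][r] == benefit_matrix[0][k]:
--                     allocation[0][r] = cost
--
--     for i in range(1, tasks):
--         for r in range(resources + 1):
--             max_benefit = -1
--             best_alloc = 0
--             for k, cost in enumerate(resources_matrix[i]):
--                 if cost <= r and cost >= 1:  # Only allow cost ≥ 1
--                     prev_benefit = dp[i - 1][r - cost]
--                     if prev_benefit != -1:
--                         benefit = benefit_matrix[i][k] + prev_benefit
--                         if benefit > max_benefit:
--                             max_benefit = benefit
--                             best_alloc = cost
--             dp[i][r] = max_benefit
--             allocation[i][r] = best_alloc
--
--     if dp[tasks - 1][resources] == -1: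
--         return 0, [0] * tasks  # No valid allocation
--
--     # Backtrack
--     r = resources
--     alloc_plan = [0] * tasks
--     for i in range(tasks - 1, -1, -1):
--         alloc_plan[i] = allocation[i][r]
--         r -= allocation[i][r]
--
--     return dp[tasks - 1][resources], alloc_plan
-- ===== SOURCE B (Python) =====
-- def resource_allocation_dp(resources: int, benefit_matrix: list[list[int]], resources_matrix: list[list[int]]) -> tuple[int, list[int]]:
--     tasks = len(benefit_matrix)
--
--     # DP rows only (no allocation matrix).  A virtual previous row of zeros
--     # makes task 0 an instance of the general recurrence.
--     prev = [0] * (resources + 1)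
--     rows = []
--     for i in range(tasks):
--         cur = [max([-1] + [benefit_matrix[i][k] + prev[r - c]
--                            for k, c in enumerate(resources_matrix[i])
--                            if 1 <= c <= r and prev[r - c] != -1])
--                for r in range(resources + 1)]
--         rows.append(cur)
--         prev = cur
--
--     if rows[tasks - 1][resources] == -1:
--         return 0, [0] * tasks
--
--     # Backtrack by recomputation instead of a stored allocation matrix.
--     plan = [0] * tasks
--     r = resources
--     for i in range(tasks - 1, 0, -1):
--         for k, c in enumerate(resources_matrix[i]):
--             if 1 <= c <= r and rows[i - 1][r - c] != -1 \
--                     and benefit_matrix[i][k] + rows[i - 1][r - c] == rows[i][r]: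
--                 plan[i] = c
--                 r -= c
--                 break
--     # task 0 kept the LAST equally-good option in A, so scan without break
--     for k, c in enumerate(resources_matrix[0]):
--         if 1 <= c <= r and benefit_matrix[0][k] == rows[0][r]:
--             plan[0] = c
--
--     return rows[tasks - 1][resources], plan
-- ===== Notes on version B (the rewrite author's own statement) =====
-- stated objective: alternative
-- what changed: B drops A's allocation matrix entirely: dp rows are built by a max-over-candidates comprehension in which a virtual zero row makes task 0 an instance of the general recurrence, and the plan is reconstructed during backtracking by re-scanning the options (first match for tasks > 0, last match for task 0, mirroring A's asymmetric tie-break).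
-- outside the precondition, e.g. on resource_allocation_dp(1, [[], []], [[], [1]]): A returns (0, [0, 0]), B returns (0, [0, 0])
import Mathlib
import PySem

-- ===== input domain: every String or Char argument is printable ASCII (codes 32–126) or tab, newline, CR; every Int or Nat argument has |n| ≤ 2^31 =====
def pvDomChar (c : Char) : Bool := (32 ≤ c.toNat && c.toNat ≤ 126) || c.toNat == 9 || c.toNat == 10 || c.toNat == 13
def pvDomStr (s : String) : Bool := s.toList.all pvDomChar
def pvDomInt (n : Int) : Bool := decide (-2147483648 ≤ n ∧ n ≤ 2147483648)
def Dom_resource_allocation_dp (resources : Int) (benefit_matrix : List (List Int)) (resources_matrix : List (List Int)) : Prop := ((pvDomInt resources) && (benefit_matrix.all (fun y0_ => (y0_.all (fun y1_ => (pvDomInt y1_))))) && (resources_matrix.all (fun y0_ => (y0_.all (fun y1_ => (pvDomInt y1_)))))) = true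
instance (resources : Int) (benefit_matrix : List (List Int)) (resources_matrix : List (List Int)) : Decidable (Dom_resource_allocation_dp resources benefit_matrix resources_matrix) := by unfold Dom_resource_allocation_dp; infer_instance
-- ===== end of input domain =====

-- B drops A's allocation matrix: dp rows are built by a max-over-candidates
-- comprehension (a virtual zero row makes task 0 an instance of the general
-- recurrence) and the plan is rebuilt by re-scanning the options during
-- backtracking; same cost class, no speed claim.

-- ===== PORT A =====
-- inner loop of A's row-0 fill, state = (dp[0][r], allocation[0][r])
def pvA_step0 (bm0 : List Int) (r : Int) (s : Int × Int) (kc : Int × Int) : Int × Int :=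
  if kc.2 ≤ r ∧ kc.2 ≥ 1 then
    let d := max s.1 (PySem.List.pyGetD bm0 kc.1 0)
    (d, if d = PySem.List.pyGetD bm0 kc.1 0 then kc.2 else s.2)
  else s

def pvA_cell0 (bm0 rm0 : List Int) (r : Int) : Int × Int :=
  (PySem.List.enumerate rm0).foldl (pvA_step0 bm0 r) (-1, 0)

-- inner loop of A's row-i fill, state = (max_benefit, best_alloc)
def pvA_stepi (bmi prev : List Int) (r : Int) (s : Int × Int) (kc : Int × Int) : Int × Int :=
  if kc.2 ≤ r ∧ kc.2 ≥ 1 then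
    if PySem.List.pyGetD prev (r - kc.2) (-1) ≠ -1 then
      if PySem.List.pyGetD bmi kc.1 0 + PySem.List.pyGetD prev (r - kc.2) (-1) > s.1
      then (PySem.List.pyGetD bmi kc.1 0 + PySem.List.pyGetD prev (r - kc.2) (-1), kc.2) else s
    else s
  else s

def pvA_celli (bmi rmi prev : List Int) (r : Int) : Int × Int :=
  (PySem.List.enumerate rmi).foldl (pvA_stepi bmi prev r) (-1, 0)

-- body of A's 'for i in range(1, tasks)' loop, state = (dp, allocation)
def pvA_fillStep (resources : Int) (bm rm : List (List Int)) (st : List (List Int) × List (List Int)) (i : Int) : List (List Int) × List (List Int) :=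
  let prev := PySem.List.pyGetD st.1 (i-1) []
  let cells := (PySem.List.pyRange 0 (resources+1) 1).map
      (pvA_celli (PySem.List.pyGetD bm i []) (PySem.List.pyGetD rm i []) prev)
  (st.1 ++ [cells.map Prod.fst], st.2 ++ [cells.map Prod.snd])

-- body of A's backtrack loop, state = (r, alloc_plan)
def pvA_btStep (al : List (List Int)) (s : Int × List Int) (i : Int) : Int × List Int :=
  let a := PySem.List.pyGetD (PySem.List.pyGetD al i []) s.1 0
  (s.1 - a, s.2.set i.toNat a)

def resource_allocation_dp (resources : Int) (benefit_matrix : List (List Int)) (resources_matrix : List (List Int)) : Int × List Int :=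
  let tasks : Int := benefit_matrix.length
  let row0 := (PySem.List.pyRange 0 (resources+1) 1).map
      (pvA_cell0 (PySem.List.pyGetD benefit_matrix 0 []) (PySem.List.pyGetD resources_matrix 0 []))
  let st := (PySem.List.pyRange 1 tasks 1).foldl (pvA_fillStep resources benefit_matrix resources_matrix)
      ([row0.map Prod.fst], [row0.map Prod.snd])
  let fin := PySem.List.pyGetD (PySem.List.pyGetD st.1 (tasks-1) []) resources (-1)
  if fin = -1 then (0, List.replicate benefit_matrix.length 0)
  else (fin, ((PySem.List.pyRange (tasks-1) (-1) (-1)).foldl (pvA_btStep st.2)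
      (resources, List.replicate benefit_matrix.length 0)).2)

-- ===== PORT B =====
-- one dp row from the previous row: max([-1] + [candidates])
def pvB_row (bmi rmi prev : List Int) (resources : Int) : List Int :=
  (PySem.List.pyRange 0 (resources+1) 1).map (fun r =>
    ((PySem.List.enumerate rmi).filterMap (fun kc =>
        if 1 ≤ kc.2 ∧ kc.2 ≤ r ∧ PySem.List.pyGetD prev (r - kc.2) (-1) ≠ -1
        then some (PySem.List.pyGetD bmi kc.1 0 + PySem.List.pyGetD prev (r - kc.2) (-1))
        else none)).foldl max (-1))

def pvB_fillStep (resources : Int) (bm rm : List (List Int)) (st : List Int × List (List Int)) (i : Int) : List Int × List (List Int) :=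
  let cur := pvB_row (PySem.List.pyGetD bm i []) (PySem.List.pyGetD rm i []) st.1 resources
  (cur, st.2 ++ [cur])

-- backtrack for tasks i > 0: first option explaining rows[i][r]
def pvB_btPred (bmi prevrow : List Int) (r target : Int) (kc : Int × Int) : Bool :=
  decide (1 ≤ kc.2) && decide (kc.2 ≤ r) &&
    (PySem.List.pyGetD prevrow (r - kc.2) (-1) != -1) &&
    (PySem.List.pyGetD bmi kc.1 0 + PySem.List.pyGetD prevrow (r - kc.2) (-1) == target)

def pvB_btStep (bm rm : List (List Int)) (rows : List (List Int)) (s : Int × List Int) (i : Int) : Int × List Int :=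
  match (PySem.List.enumerate (PySem.List.pyGetD rm i [])).find?
      (pvB_btPred (PySem.List.pyGetD bm i []) (PySem.List.pyGetD rows (i-1) []) s.1
        (PySem.List.pyGetD (PySem.List.pyGetD rows i []) s.1 (-1))) with
  | some kc => (s.1 - kc.2, s.2.set i.toNat kc.2)
  | none => s

-- task 0 kept the LAST equally-good option in A: scan without break
def pvB_task0 (bm0 rm0 row0 : List Int) (r : Int) : Int :=
  (PySem.List.enumerate rm0).foldl
    (fun a kc =>
      if 1 ≤ kc.2 ∧ kc.2 ≤ r ∧ PySem.List.pyGetD bm0 kc.1 0 = PySem.List.pyGetD row0 r (-1)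
      then kc.2 else a) 0

def resource_allocation_dp_alt (resources : Int) (benefit_matrix : List (List Int)) (resources_matrix : List (List Int)) : Int × List Int :=
  let tasks : Int := benefit_matrix.length
  let zeros := (PySem.List.pyRange 0 (resources+1) 1).map (fun _ => (0 : Int))
  let rows := ((PySem.List.pyRange 0 tasks 1).foldl (pvB_fillStep resources benefit_matrix resources_matrix) (zeros, [])).2
  let fin := PySem.List.pyGetD (PySem.List.pyGetD rows (tasks-1) []) resources (-1)
  if fin = -1 then (0, List.replicate benefit_matrix.length 0)
  else
    let bt := (PySem.List.pyRange (tasks-1) 0 (-1)).foldl (pvB_btStep benefit_matrix resources_matrix rows)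
        (resources, List.replicate benefit_matrix.length 0)
    (fin, bt.2.set 0 (pvB_task0 (PySem.List.pyGetD benefit_matrix 0 []) (PySem.List.pyGetD resources_matrix 0 [])
        (PySem.List.pyGetD rows 0 []) bt.1))

-- ===== PRECONDITION & SPEC =====
-- Pre_ excludes exactly the inputs on which the Python A raises IndexError
-- (negative resources, no tasks, fewer option rows than tasks, a feasible
-- option index with no benefit entry) — except that on the last kind A happens
-- to return when the dp state guarding the missing benefit entry is
-- unreachable; there A and B return the same value (B skips it under the same
-- guard), see the cite.
def Pre_resource_allocation_dp (resources : Int) (benefit_matrix : List (List Int)) (resources_matrix : List (List Int)) : Prop :=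
  0 ≤ resources ∧ benefit_matrix ≠ [] ∧
  benefit_matrix.length ≤ resources_matrix.length ∧
  ∀ i < benefit_matrix.length, ∀ k < (resources_matrix.getD i []).length,
    (1 ≤ (resources_matrix.getD i []).getD k 0 ∧ (resources_matrix.getD i []).getD k 0 ≤ resources) →
      k < (benefit_matrix.getD i []).length
instance (resources : Int) (benefit_matrix : List (List Int)) (resources_matrix : List (List Int)) : Decidable (Pre_resource_allocation_dp resources benefit_matrix resources_matrix) := by unfold Pre_resource_allocation_dp; infer_instance

def pvWitness_resource_allocation_dp : Int × List (List Int) × List (List Int) :=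
  (3, [[5, 6], [1, 2]], [[1, 2], [1, 2]])

def Spec_resource_allocation_dp (resources : Int) (benefit_matrix : List (List Int)) (resources_matrix : List (List Int)) (out : Int × List Int) : Prop := out = resource_allocation_dp_alt resources benefit_matrix resources_matrix
instance (resources : Int) (benefit_matrix : List (List Int)) (resources_matrix : List (List Int)) (out : Int × List Int) : Decidable (Spec_resource_allocation_dp resources benefit_matrix resources_matrix out) := by unfold Spec_resource_allocation_dp; infer_instance

-- ===== CLAIM (what is proved, stated in full; the proofs are below) =====
def Claim_equal_resource_allocation_dp : Prop := ∀ (resources : Int) (benefit_matrix : List (List Int)) (resources_matrix : List (List Int)), Dom_resource_allocation_dp resources benefit_matrix resources_matrix → Pre_resource_allocation_dp resources benefit_matrix resources_matrix → Spec_resource_allocation_dp resources benefit_matrix resources_matrix (resource_allocation_dp resources benefit_matrix resources_matrix)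

-- ===== LEMMAS AND PROOFS =====

-- ---- generic facts about A's inner row-0 loop ----

lemma pvf0_mono (bm0 : List Int) (r : Int) :
    ∀ (l : List (Int × Int)) (d a : Int), d ≤ (l.foldl (pvA_step0 bm0 r) (d, a)).1 := by
  intro l
  induction l with
  | nil => intro d a; simp
  | cons x t ih =>
    intro d a
    by_cases h : x.2 ≤ r ∧ x.2 ≥ 1
    · simp only [List.foldl_cons, pvA_step0, if_pos h]
      exact le_trans (le_max_left _ _) (ih _ _)
    · simp only [List.foldl_cons, pvA_step0, if_neg h]
      exact ih _ _

lemma pvf0_fst (bm0 : List Int) (r : Int) :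
    ∀ (l : List (Int × Int)) (d a : Int),
      (l.foldl (pvA_step0 bm0 r) (d, a)).1
        = (l.filterMap (fun kc => if kc.2 ≤ r ∧ kc.2 ≥ 1 then some (PySem.List.pyGetD bm0 kc.1 0) else none)).foldl max d := by
  intro l
  induction l with
  | nil => intro d a; simp
  | cons x t ih =>
    intro d a
    by_cases h : x.2 ≤ r ∧ x.2 ≥ 1
    · simp only [List.foldl_cons, pvA_step0, if_pos h, List.filterMap_cons, ih]
    · simp only [List.foldl_cons, pvA_step0, if_neg h, List.filterMap_cons, ih]

-- the last option whose benefit equals M (the B-side task-0 reconstruction)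
def pvLast0 (bm0 : List Int) (r M a : Int) (l : List (Int × Int)) : Int :=
  l.foldl (fun acc kc => if (kc.2 ≤ r ∧ kc.2 ≥ 1) ∧ PySem.List.pyGetD bm0 kc.1 0 = M then kc.2 else acc) a

lemma pvf0_irrel (bm0 : List Int) (r : Int) :
    ∀ (l : List (Int × Int)) (d a a1 a2 M : Int), d < M →
      M = (l.foldl (pvA_step0 bm0 r) (d, a)).1 →
      pvLast0 bm0 r M a1 l = pvLast0 bm0 r M a2 l := by
  intro l
  induction l with
  | nil =>
    intro d a a1 a2 M hdM hM
    simp at hM; omega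
  | cons x t ih =>
    intro d a a1 a2 M hdM hM
    by_cases h : x.2 ≤ r ∧ x.2 ≥ 1
    · simp only [List.foldl_cons, pvA_step0, if_pos h] at hM
      by_cases hb : PySem.List.pyGetD bm0 x.1 0 = M
      · simp only [pvLast0, List.foldl_cons, if_pos (And.intro h hb)]
      · simp only [pvLast0, List.foldl_cons,
          if_neg (fun hc : (x.2 ≤ r ∧ x.2 ≥ 1) ∧ _ => hb hc.2)]
        by_cases hle : d ≤ PySem.List.pyGetD bm0 x.1 0
        · have hmax : max d (PySem.List.pyGetD bm0 x.1 0) = PySem.List.pyGetD bm0 x.1 0 :=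
            max_eq_right hle
          rw [hmax] at hM
          have hbM : PySem.List.pyGetD bm0 x.1 0 ≤ M := by
            rw [hM]; exact pvf0_mono bm0 r t _ _
          exact ih _ _ a1 a2 M (lt_of_le_of_ne hbM hb) hM
        · have hmax : max d (PySem.List.pyGetD bm0 x.1 0) = d := max_eq_left (by omega)
          rw [hmax] at hM
          exact ih _ _ a1 a2 M hdM hM
    · simp only [List.foldl_cons, pvA_step0, if_neg h] at hM
      simp only [pvLast0, List.foldl_cons, if_neg (fun hc : (x.2 ≤ r ∧ x.2 ≥ 1) ∧ _ => h hc.1)]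
      exact ih _ _ a1 a2 M hdM hM

lemma pvf0_last (bm0 : List Int) (r : Int) :
    ∀ (l : List (Int × Int)) (d a M : Int),
      M = (l.foldl (pvA_step0 bm0 r) (d, a)).1 →
      (l.foldl (pvA_step0 bm0 r) (d, a)).2 = pvLast0 bm0 r M a l := by
  intro l
  induction l with
  | nil => intro d a M hM; simp [pvLast0]
  | cons x t ih =>
    intro d a M hM
    by_cases h : x.2 ≤ r ∧ x.2 ≥ 1
    · simp only [List.foldl_cons, pvA_step0, if_pos h] at hM ⊢
      by_cases hle : d ≤ PySem.List.pyGetD bm0 x.1 0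
      · have hmax : max d (PySem.List.pyGetD bm0 x.1 0) = PySem.List.pyGetD bm0 x.1 0 :=
          max_eq_right hle
        rw [hmax] at hM ⊢
        rw [if_pos rfl] at hM ⊢
        by_cases hbM : PySem.List.pyGetD bm0 x.1 0 = M
        · simp only [pvLast0, List.foldl_cons, if_pos (And.intro h hbM)]
          exact ih _ _ M hM
        · simp only [pvLast0, List.foldl_cons,
            if_neg (fun hc : (x.2 ≤ r ∧ x.2 ≥ 1) ∧ _ => hbM hc.2)]
          have hbM' : PySem.List.pyGetD bm0 x.1 0 < M := by
            have : PySem.List.pyGetD bm0 x.1 0 ≤ M := by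
              rw [hM]; exact pvf0_mono bm0 r t _ _
            exact lt_of_le_of_ne this hbM
          calc (t.foldl (pvA_step0 bm0 r) (PySem.List.pyGetD bm0 x.1 0, x.2)).2
              = pvLast0 bm0 r M x.2 t := ih _ _ M hM
            _ = pvLast0 bm0 r M a t := pvf0_irrel bm0 r t _ _ x.2 a M hbM' hM
      · have hmax : max d (PySem.List.pyGetD bm0 x.1 0) = d := max_eq_left (by omega)
        rw [hmax] at hM ⊢
        rw [if_neg (by omega)] at hM ⊢
        have hbM : PySem.List.pyGetD bm0 x.1 0 ≠ M := by
          have : d ≤ M := by rw [hM]; exact pvf0_mono bm0 r t _ _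
          omega
        simp only [pvLast0, List.foldl_cons,
          if_neg (fun hc : (x.2 ≤ r ∧ x.2 ≥ 1) ∧ _ => hbM hc.2)]
        exact ih _ _ M hM
    · simp only [List.foldl_cons, pvA_step0, if_neg h] at hM ⊢
      simp only [pvLast0, List.foldl_cons, if_neg (fun hc : (x.2 ≤ r ∧ x.2 ≥ 1) ∧ _ => h hc.1)]
      exact ih _ _ M hM

lemma pvB_task0_eq_pvLast0 (bm0 rm0 row0 : List Int) (r : Int) :
    pvB_task0 bm0 rm0 row0 r
      = pvLast0 bm0 r (PySem.List.pyGetD row0 r (-1)) 0 (PySem.List.enumerate rm0) := by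
  unfold pvB_task0 pvLast0
  have key : ∀ (l : List (Int × Int)) (a : Int),
      l.foldl (fun acc kc =>
        if 1 ≤ kc.2 ∧ kc.2 ≤ r ∧ PySem.List.pyGetD bm0 kc.1 0 = PySem.List.pyGetD row0 r (-1)
        then kc.2 else acc) a
      = l.foldl (fun acc kc =>
          if (kc.2 ≤ r ∧ kc.2 ≥ 1) ∧ PySem.List.pyGetD bm0 kc.1 0 = PySem.List.pyGetD row0 r (-1)
          then kc.2 else acc) a := by
    intro l
    induction l with
    | nil => intro a; rfl
    | cons x t ih =>
      intro a
      simp only [List.foldl_cons]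
      rw [ih]
      congr 1
      split_ifs with h1 h2 h2 <;> first | rfl | (exfalso; revert h1 h2; tauto)
  exact key _ 0

-- ---- generic facts about A's inner row-i loop ----

lemma pvfi_mono (bmi prev : List Int) (r : Int) :
    ∀ (l : List (Int × Int)) (d a : Int), d ≤ (l.foldl (pvA_stepi bmi prev r) (d, a)).1 := by
  intro l
  induction l with
  | nil => intro d a; simp
  | cons x t ih =>
    intro d a
    simp only [List.foldl_cons, pvA_stepi]
    split_ifs with h1 h2 h3
    · exact le_trans (le_of_lt h3) (ih _ _)
    · exact ih _ _
    · exact ih _ _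
    · exact ih _ _

lemma pvfi_fst (bmi prev : List Int) (r : Int) :
    ∀ (l : List (Int × Int)) (d a : Int),
      (l.foldl (pvA_stepi bmi prev r) (d, a)).1
        = (l.filterMap (fun kc =>
            if 1 ≤ kc.2 ∧ kc.2 ≤ r ∧ PySem.List.pyGetD prev (r - kc.2) (-1) ≠ -1
            then some (PySem.List.pyGetD bmi kc.1 0 + PySem.List.pyGetD prev (r - kc.2) (-1))
            else none)).foldl max d := by
  intro l
  induction l with
  | nil => intro d a; simp
  | cons x t ih =>
    intro d a
    by_cases h1 : x.2 ≤ r ∧ x.2 ≥ 1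
    · by_cases h2 : PySem.List.pyGetD prev (r - x.2) (-1) ≠ -1
      · have hg : (if 1 ≤ x.2 ∧ x.2 ≤ r ∧ PySem.List.pyGetD prev (r - x.2) (-1) ≠ -1
            then some (PySem.List.pyGetD bmi x.1 0 + PySem.List.pyGetD prev (r - x.2) (-1))
            else none)
            = some (PySem.List.pyGetD bmi x.1 0 + PySem.List.pyGetD prev (r - x.2) (-1)) :=
          if_pos ⟨h1.2, h1.1, h2⟩
        rw [List.filterMap_cons, hg, List.foldl_cons, List.foldl_cons]
        by_cases h3 : PySem.List.pyGetD bmi x.1 0 + PySem.List.pyGetD prev (r - x.2) (-1) > d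
        · have hstep : pvA_stepi bmi prev r (d, a) x
              = (PySem.List.pyGetD bmi x.1 0 + PySem.List.pyGetD prev (r - x.2) (-1), x.2) := by
            unfold pvA_stepi; rw [if_pos h1, if_pos h2, if_pos h3]
          rw [hstep, ih, max_eq_right (le_of_lt h3)]
        · have hstep : pvA_stepi bmi prev r (d, a) x = (d, a) := by
            unfold pvA_stepi; rw [if_pos h1, if_pos h2, if_neg h3]
          rw [hstep, ih, max_eq_left (by omega)]
      · have hg : (if 1 ≤ x.2 ∧ x.2 ≤ r ∧ PySem.List.pyGetD prev (r - x.2) (-1) ≠ -1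
            then some (PySem.List.pyGetD bmi x.1 0 + PySem.List.pyGetD prev (r - x.2) (-1))
            else none) = none := if_neg (by tauto)
        rw [List.filterMap_cons, hg, List.foldl_cons]
        have hstep : pvA_stepi bmi prev r (d, a) x = (d, a) := by
          unfold pvA_stepi; rw [if_pos h1, if_neg h2]
        rw [hstep, ih]
    · have hg : (if 1 ≤ x.2 ∧ x.2 ≤ r ∧ PySem.List.pyGetD prev (r - x.2) (-1) ≠ -1
          then some (PySem.List.pyGetD bmi x.1 0 + PySem.List.pyGetD prev (r - x.2) (-1))
          else none) = none := if_neg (by tauto)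
      rw [List.filterMap_cons, hg, List.foldl_cons]
      have hstep : pvA_stepi bmi prev r (d, a) x = (d, a) := by
        unfold pvA_stepi; rw [if_neg h1]
      rw [hstep, ih]

lemma pvfi_snd_const (bmi prev : List Int) (r : Int) :
    ∀ (l : List (Int × Int)) (d a : Int),
      (l.foldl (pvA_stepi bmi prev r) (d, a)).1 = d →
      (l.foldl (pvA_stepi bmi prev r) (d, a)).2 = a := by
  intro l
  induction l with
  | nil => intro d a _; simp
  | cons x t ih =>
    intro d a hfst
    simp only [List.foldl_cons, pvA_stepi] at hfst ⊢
    split_ifs at hfst ⊢ with h1 h2 h3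
    · exfalso
      have := pvfi_mono bmi prev r t (PySem.List.pyGetD bmi x.1 0 + PySem.List.pyGetD prev (r - x.2) (-1)) x.2
      omega
    · exact ih _ _ hfst
    · exact ih _ _ hfst
    · exact ih _ _ hfst

lemma pvfi_find (bmi prev : List Int) (r : Int) :
    ∀ (l : List (Int × Int)) (d a M : Int), d < M →
      M = (l.foldl (pvA_stepi bmi prev r) (d, a)).1 →
      ∃ kc, l.find? (pvB_btPred bmi prev r M) = some kc
        ∧ kc.2 = (l.foldl (pvA_stepi bmi prev r) (d, a)).2 := by
  intro l
  induction l with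
  | nil =>
    intro d a M hdM hM
    simp at hM; omega
  | cons x t ih =>
    intro d a M hdM hM
    simp only [List.foldl_cons, pvA_stepi] at hM ⊢
    by_cases h1 : x.2 ≤ r ∧ x.2 ≥ 1
    · by_cases h2 : PySem.List.pyGetD prev (r - x.2) (-1) ≠ -1
      · rw [if_pos h1, if_pos h2] at hM ⊢
        by_cases h3 : PySem.List.pyGetD bmi x.1 0 + PySem.List.pyGetD prev (r - x.2) (-1) > d
        · rw [if_pos h3] at hM ⊢
          by_cases hbM : PySem.List.pyGetD bmi x.1 0 + PySem.List.pyGetD prev (r - x.2) (-1) = M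
          · refine ⟨x, ?_, ?_⟩
            · apply List.find?_cons_of_pos
              unfold pvB_btPred
              simp only [Bool.and_eq_true, decide_eq_true_eq, bne_iff_ne, ne_eq, beq_iff_eq]
              refine ⟨⟨⟨by omega, by omega⟩, h2⟩, hbM⟩
            · have : (t.foldl (pvA_stepi bmi prev r)
                  (PySem.List.pyGetD bmi x.1 0 + PySem.List.pyGetD prev (r - x.2) (-1), x.2)).1
                  = PySem.List.pyGetD bmi x.1 0 + PySem.List.pyGetD prev (r - x.2) (-1) := by omega
              exact (pvfi_snd_const bmi prev r t _ _ this).symm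
          · have hlt : PySem.List.pyGetD bmi x.1 0 + PySem.List.pyGetD prev (r - x.2) (-1) < M := by
              have := pvfi_mono bmi prev r t
                (PySem.List.pyGetD bmi x.1 0 + PySem.List.pyGetD prev (r - x.2) (-1)) x.2
              omega
            have hneg : ¬ pvB_btPred bmi prev r M x = true := by
              unfold pvB_btPred
              simp only [Bool.and_eq_true, decide_eq_true_eq, bne_iff_ne, ne_eq, beq_iff_eq]
              omega
            rw [List.find?_cons_of_neg hneg]
            exact ih _ _ M hlt hM
        · rw [if_neg h3] at hM ⊢
          have hneg : ¬ pvB_btPred bmi prev r M x = true := by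
            unfold pvB_btPred
            simp only [Bool.and_eq_true, decide_eq_true_eq, bne_iff_ne, ne_eq, beq_iff_eq]
            omega
          rw [List.find?_cons_of_neg hneg]
          exact ih _ _ M hdM hM
      · rw [if_pos h1, if_neg h2] at hM ⊢
        have hneg : ¬ pvB_btPred bmi prev r M x = true := by
          unfold pvB_btPred
          simp only [Bool.and_eq_true, decide_eq_true_eq, bne_iff_ne, ne_eq, beq_iff_eq]
          simp only [ne_eq, not_not] at h2
          tauto
        rw [List.find?_cons_of_neg hneg]
        exact ih _ _ M hdM hM
    · rw [if_neg h1] at hM ⊢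
      have hneg : ¬ pvB_btPred bmi prev r M x = true := by
        unfold pvB_btPred
        simp only [Bool.and_eq_true, decide_eq_true_eq, bne_iff_ne, ne_eq, beq_iff_eq]
        omega
      rw [List.find?_cons_of_neg hneg]
      exact ih _ _ M hdM hM

-- ---- the dp rows of A, as a recursion on the task index ----

def pvDpRow (res : Int) (bm rm : List (List Int)) : Nat → List Int
  | 0 => ((PySem.List.pyRange 0 (res+1) 1).map (pvA_cell0 (bm.getD 0 []) (rm.getD 0 []))).map Prod.fst
  | (i+1) => ((PySem.List.pyRange 0 (res+1) 1).map
      (pvA_celli (bm.getD (i+1) []) (rm.getD (i+1) []) (pvDpRow res bm rm i))).map Prod.fst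

def pvAlRow (res : Int) (bm rm : List (List Int)) : Nat → List Int
  | 0 => ((PySem.List.pyRange 0 (res+1) 1).map (pvA_cell0 (bm.getD 0 []) (rm.getD 0 []))).map Prod.snd
  | (i+1) => ((PySem.List.pyRange 0 (res+1) 1).map
      (pvA_celli (bm.getD (i+1) []) (rm.getD (i+1) []) (pvDpRow res bm rm i))).map Prod.snd

lemma pvGetD_map_range {α : Type} (f : Nat → α) (t j : Nat) (hj : j < t) (d : α) :
    ((List.range t).map f).getD j d = f j := by
  rw [List.getD_eq_getElem?_getD]
  simp [hj]

lemma pvA_matrix (res : Int) (bm rm : List (List Int)) :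
    ∀ (t : Nat), 1 ≤ t →
      (PySem.List.pyRange 1 (t : Int) 1).foldl (pvA_fillStep res bm rm)
          ([pvDpRow res bm rm 0], [pvAlRow res bm rm 0])
        = ((List.range t).map (pvDpRow res bm rm), (List.range t).map (pvAlRow res bm rm)) := by
  intro t
  induction t with
  | zero => omega
  | succ n ih =>
    intro _
    by_cases hn : 1 ≤ n
    · have hcast : ((n+1 : Nat) : Int) = (n : Int) + 1 := by push_cast; ring
      rw [hcast, show PySem.List.pyRange 1 ((n : Int) + 1) 1
            = PySem.List.pyRange 1 (n : Int) 1 ++ [(n : Int)] from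
          PySem.List.pyRange_one_succ_right (by exact_mod_cast hn), List.foldl_append, ih hn]
      simp only [List.foldl_cons, List.foldl_nil, pvA_fillStep]
      have hprev : PySem.List.pyGetD ((List.range n).map (pvDpRow res bm rm)) ((n : Int) - 1) []
          = pvDpRow res bm rm (n - 1) := by
        have h1 : ((n : Int) - 1) = ((n - 1 : Nat) : Int) := by omega
        rw [h1, PySem.List.pyGetD_natCast]
        exact pvGetD_map_range _ n (n-1) (by omega) []
      rw [hprev]
      have hbm : PySem.List.pyGetD bm (n : Int) [] = bm.getD n [] := PySem.List.pyGetD_natCast _ _ _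
      have hrm : PySem.List.pyGetD rm (n : Int) [] = rm.getD n [] := PySem.List.pyGetD_natCast _ _ _
      rw [hbm, hrm]
      obtain ⟨m, rfl⟩ : ∃ m, n = m + 1 := ⟨n - 1, by omega⟩
      have hm : m + 1 - 1 = m := by omega
      rw [hm]
      simp only [List.range_succ, List.map_append, List.map_cons, List.map_nil]
      rfl
    · have hn0 : n = 0 := by omega
      subst hn0
      rw [show ((1 : Nat) : Int) = 1 by rfl, PySem.List.pyRange_one_eq_nil (le_refl 1)]
      simp

-- ---- the dp rows of B, and their equality with A's ----

def pvDpRowB (res : Int) (bm rm : List (List Int)) : Nat → List Int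
  | 0 => pvB_row (bm.getD 0 []) (rm.getD 0 [])
      ((PySem.List.pyRange 0 (res+1) 1).map (fun _ => (0 : Int))) res
  | (i+1) => pvB_row (bm.getD (i+1) []) (rm.getD (i+1) []) (pvDpRowB res bm rm i) res

def pvPrevB (res : Int) (bm rm : List (List Int)) : Nat → List Int
  | 0 => (PySem.List.pyRange 0 (res+1) 1).map (fun _ => (0 : Int))
  | (i+1) => pvDpRowB res bm rm i

lemma pvB_matrix (res : Int) (bm rm : List (List Int)) :
    ∀ (t : Nat),
      (PySem.List.pyRange 0 (t : Int) 1).foldl (pvB_fillStep res bm rm)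
          ((PySem.List.pyRange 0 (res+1) 1).map (fun _ => (0 : Int)), [])
        = (pvPrevB res bm rm t, (List.range t).map (pvDpRowB res bm rm)) := by
  intro t
  induction t with
  | zero => simp [pvPrevB, PySem.List.pyRange_one_eq_nil]
  | succ n ih =>
    have hcast : ((n+1 : Nat) : Int) = (n : Int) + 1 := by push_cast; ring
    rw [hcast, show PySem.List.pyRange 0 ((n : Int) + 1) 1
          = PySem.List.pyRange 0 (n : Int) 1 ++ [(n : Int)] from
        PySem.List.pyRange_one_succ_right (by exact_mod_cast Nat.zero_le n), List.foldl_append, ih]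
    simp only [List.foldl_cons, List.foldl_nil, pvB_fillStep]
    have hbm : PySem.List.pyGetD bm (n : Int) [] = bm.getD n [] := PySem.List.pyGetD_natCast _ _ _
    have hrm : PySem.List.pyGetD rm (n : Int) [] = rm.getD n [] := PySem.List.pyGetD_natCast _ _ _
    rw [hbm, hrm]
    have hcur : pvB_row (bm.getD n []) (rm.getD n []) (pvPrevB res bm rm n) res
        = pvDpRowB res bm rm n := by
      cases n with
      | zero => rfl
      | succ m => rfl
    rw [hcur]
    simp only [List.range_succ, List.map_append, List.map_cons, List.map_nil]
    rfl

lemma pvRowi_fst_eq (bmi rmi prev : List Int) (res : Int) :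
    pvB_row bmi rmi prev res
      = ((PySem.List.pyRange 0 (res+1) 1).map (pvA_celli bmi rmi prev)).map Prod.fst := by
  unfold pvB_row
  rw [List.map_map]
  apply List.map_congr_left
  intro r _
  exact (pvfi_fst bmi prev r (PySem.List.enumerate rmi) (-1) 0).symm

lemma pvRow0_eq (bm0 rm0 : List Int) (res : Int) :
    pvB_row bm0 rm0 ((PySem.List.pyRange 0 (res+1) 1).map (fun _ => (0 : Int))) res
      = ((PySem.List.pyRange 0 (res+1) 1).map (pvA_cell0 bm0 rm0)).map Prod.fst := by
  unfold pvB_row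
  rw [List.map_map]
  apply List.map_congr_left
  intro r hr
  rw [PySem.List.mem_pyRange_one] at hr
  have hfm : (PySem.List.enumerate rm0).filterMap (fun kc =>
      if 1 ≤ kc.2 ∧ kc.2 ≤ r ∧
          PySem.List.pyGetD ((PySem.List.pyRange 0 (res+1) 1).map (fun _ => (0 : Int))) (r - kc.2) (-1) ≠ -1
      then some (PySem.List.pyGetD bm0 kc.1 0 +
          PySem.List.pyGetD ((PySem.List.pyRange 0 (res+1) 1).map (fun _ => (0 : Int))) (r - kc.2) (-1))
      else none)
      = (PySem.List.enumerate rm0).filterMap (fun kc =>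
          if kc.2 ≤ r ∧ kc.2 ≥ 1 then some (PySem.List.pyGetD bm0 kc.1 0) else none) := by
    apply List.filterMap_congr
    intro kc _
    by_cases h : 1 ≤ kc.2 ∧ kc.2 ≤ r
    · have hz : PySem.List.pyGetD ((PySem.List.pyRange 0 (res+1) 1).map (fun _ => (0 : Int)))
          (r - kc.2) (-1) = 0 := by
        rw [PySem.List.pyGetD_map_pyRange_of_nonneg _ _ _ _ (by omega) (by omega)]
      rw [hz]
      rw [if_pos ⟨h.1, h.2, by omega⟩, if_pos (by omega)]
      rw [add_zero]
    · rw [if_neg (by tauto), if_neg (by omega)]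
  rw [hfm]
  exact (pvf0_fst bm0 r (PySem.List.enumerate rm0) (-1) 0).symm

lemma pvRow_eq (res : Int) (bm rm : List (List Int)) :
    ∀ i, pvDpRowB res bm rm i = pvDpRow res bm rm i := by
  intro i
  induction i with
  | zero => exact pvRow0_eq _ _ res
  | succ n ih =>
    show pvB_row (bm.getD (n+1) []) (rm.getD (n+1) []) (pvDpRowB res bm rm n) res = _
    rw [ih]
    exact pvRowi_fst_eq _ _ _ res

-- ---- cell access ----

lemma pvDpRow_get0 (res : Int) (bm rm : List (List Int)) (r : Int) (h0 : 0 ≤ r) (h1 : r < res + 1) (d : Int) :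
    PySem.List.pyGetD (pvDpRow res bm rm 0) r d = (pvA_cell0 (bm.getD 0 []) (rm.getD 0 []) r).1 := by
  show PySem.List.pyGetD (((PySem.List.pyRange 0 (res+1) 1).map _).map Prod.fst) r d = _
  rw [List.map_map]
  exact PySem.List.pyGetD_map_pyRange_of_nonneg _ _ _ _ h0 h1

lemma pvDpRow_getS (res : Int) (bm rm : List (List Int)) (i : Nat) (r : Int) (h0 : 0 ≤ r) (h1 : r < res + 1) (d : Int) :
    PySem.List.pyGetD (pvDpRow res bm rm (i+1)) r d
      = (pvA_celli (bm.getD (i+1) []) (rm.getD (i+1) []) (pvDpRow res bm rm i) r).1 := by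
  show PySem.List.pyGetD (((PySem.List.pyRange 0 (res+1) 1).map _).map Prod.fst) r d = _
  rw [List.map_map]
  exact PySem.List.pyGetD_map_pyRange_of_nonneg _ _ _ _ h0 h1

lemma pvAlRow_get0 (res : Int) (bm rm : List (List Int)) (r : Int) (h0 : 0 ≤ r) (h1 : r < res + 1) (d : Int) :
    PySem.List.pyGetD (pvAlRow res bm rm 0) r d = (pvA_cell0 (bm.getD 0 []) (rm.getD 0 []) r).2 := by
  show PySem.List.pyGetD (((PySem.List.pyRange 0 (res+1) 1).map _).map Prod.snd) r d = _
  rw [List.map_map]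
  exact PySem.List.pyGetD_map_pyRange_of_nonneg _ _ _ _ h0 h1

lemma pvAlRow_getS (res : Int) (bm rm : List (List Int)) (i : Nat) (r : Int) (h0 : 0 ≤ r) (h1 : r < res + 1) (d : Int) :
    PySem.List.pyGetD (pvAlRow res bm rm (i+1)) r d
      = (pvA_celli (bm.getD (i+1) []) (rm.getD (i+1) []) (pvDpRow res bm rm i) r).2 := by
  show PySem.List.pyGetD (((PySem.List.pyRange 0 (res+1) 1).map _).map Prod.snd) r d = _
  rw [List.map_map]
  exact PySem.List.pyGetD_map_pyRange_of_nonneg _ _ _ _ h0 h1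

lemma pvCelli_ge (bmi rmi prev : List Int) (r : Int) : (-1 : Int) ≤ (pvA_celli bmi rmi prev r).1 :=
  pvfi_mono bmi prev r (PySem.List.enumerate rmi) (-1) 0

-- ---- the backtracking loops agree ----

lemma pvBacktrack (res : Int) (bm rm : List (List Int)) (t : Nat) (hres : 0 ≤ res) (ht : 1 ≤ t) :
    ∀ (i : Nat), i < t → ∀ (r : Int) (plan : List Int), 0 ≤ r → r ≤ res →
      PySem.List.pyGetD (pvDpRow res bm rm i) r (-1) ≠ -1 →
      ((PySem.List.pyRange (i : Int) (-1) (-1)).foldl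
          (pvA_btStep ((List.range t).map (pvAlRow res bm rm))) (r, plan)).2
        = (let b := (PySem.List.pyRange (i : Int) 0 (-1)).foldl
              (pvB_btStep bm rm ((List.range t).map (pvDpRow res bm rm))) (r, plan);
           b.2.set 0 (pvB_task0 (bm.getD 0 []) (rm.getD 0 []) (pvDpRow res bm rm 0) b.1)) := by
  intro i
  induction i with
  | zero =>
    intro _ r plan hr0 hrres _
    rw [show ((0 : Nat) : Int) = 0 by rfl]
    rw [PySem.List.pyRange_neg_one_cons (by omega : (-1 : Int) < 0),
        PySem.List.pyRange_neg_one_eq_nil (by omega : (0:Int) - 1 ≤ -1)]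
    rw [PySem.List.pyRange_neg_one_eq_nil (by omega : (0:Int) ≤ 0)]
    simp only [List.foldl_cons, List.foldl_nil, pvA_btStep]
    have hal : PySem.List.pyGetD ((List.range t).map (pvAlRow res bm rm)) (0 : Int) []
        = pvAlRow res bm rm 0 := by
      rw [show ((0:Int)) = ((0:Nat):Int) by rfl, PySem.List.pyGetD_natCast]
      exact pvGetD_map_range _ t 0 (by omega) []
    rw [hal, pvAlRow_get0 res bm rm r hr0 (by omega)]
    show (plan.set (0:Int).toNat _) = plan.set 0 _
    rw [show ((0:Int)).toNat = 0 by rfl]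
    congr 1
    rw [pvB_task0_eq_pvLast0, pvDpRow_get0 res bm rm r hr0 (by omega)]
    exact pvf0_last (bm.getD 0 []) r (PySem.List.enumerate (rm.getD 0 [])) (-1) 0 _ rfl
  | succ n ih =>
    intro hn r plan hr0 hrres hcell
    have hcast : ((n+1 : Nat) : Int) = (n : Int) + 1 := by push_cast; ring
    rw [hcast]
    rw [PySem.List.pyRange_neg_one_cons (by omega : (-1:Int) < (n:Int)+1),
        PySem.List.pyRange_neg_one_cons (by omega : (0:Int) < (n:Int)+1)]
    have hsub : (n:Int) + 1 - 1 = (n:Int) := by ring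
    rw [hsub]
    simp only [List.foldl_cons]
    -- the A step
    have hal : PySem.List.pyGetD ((List.range t).map (pvAlRow res bm rm)) ((n:Int)+1) []
        = pvAlRow res bm rm (n+1) := by
      rw [show ((n:Int)+1) = ((n+1:Nat):Int) by push_cast; ring, PySem.List.pyGetD_natCast]
      exact pvGetD_map_range _ t (n+1) hn []
    have hdpS : PySem.List.pyGetD ((List.range t).map (pvDpRow res bm rm)) ((n:Int)+1) []
        = pvDpRow res bm rm (n+1) := by
      rw [show ((n:Int)+1) = ((n+1:Nat):Int) by push_cast; ring, PySem.List.pyGetD_natCast]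
      exact pvGetD_map_range _ t (n+1) hn []
    have hdpP : PySem.List.pyGetD ((List.range t).map (pvDpRow res bm rm)) ((n:Int)+1-1) []
        = pvDpRow res bm rm n := by
      rw [hsub, show ((n:Int)) = ((n:Nat):Int) by rfl, PySem.List.pyGetD_natCast]
      exact pvGetD_map_range _ t n (by omega) []
    have hrm : PySem.List.pyGetD rm ((n:Int)+1) [] = rm.getD (n+1) [] := by
      rw [show ((n:Int)+1) = ((n+1:Nat):Int) by push_cast; ring]
      exact PySem.List.pyGetD_natCast _ _ _
    have hbm : PySem.List.pyGetD bm ((n:Int)+1) [] = bm.getD (n+1) [] := by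
      rw [show ((n:Int)+1) = ((n+1:Nat):Int) by push_cast; ring]
      exact PySem.List.pyGetD_natCast _ _ _
    have hM := pvDpRow_getS res bm rm n r hr0 (by omega) (-1)
    rw [hM] at hcell
    have hMgt : (-1 : Int) < (pvA_celli (bm.getD (n+1) []) (rm.getD (n+1) []) (pvDpRow res bm rm n) r).1 := by
      have := pvCelli_ge (bm.getD (n+1) []) (rm.getD (n+1) []) (pvDpRow res bm rm n) r
      omega
    obtain ⟨kc, hfind0, hkc20⟩ := pvfi_find (bm.getD (n+1) []) (pvDpRow res bm rm n) r
      (PySem.List.enumerate (rm.getD (n+1) [])) (-1) 0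
      ((pvA_celli (bm.getD (n+1) []) (rm.getD (n+1) []) (pvDpRow res bm rm n) r).1) hMgt rfl
    have hfind : List.find? (pvB_btPred (bm.getD (n+1) []) (pvDpRow res bm rm n) r
        ((pvA_celli (bm.getD (n+1) []) (rm.getD (n+1) []) (pvDpRow res bm rm n) r).1))
        (PySem.List.enumerate (rm.getD (n+1) [])) = some kc := hfind0
    have hkc2 : kc.2 = (pvA_celli (bm.getD (n+1) []) (rm.getD (n+1) []) (pvDpRow res bm rm n) r).2 := hkc20
    have hpred := List.find?_some hfind
    unfold pvB_btPred at hpred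
    simp only [Bool.and_eq_true, decide_eq_true_eq, bne_iff_ne, ne_eq, beq_iff_eq] at hpred
    obtain ⟨⟨⟨hk1, hk2⟩, hkprev⟩, hkval⟩ := hpred
    -- the B step
    have hBstep : pvB_btStep bm rm ((List.range t).map (pvDpRow res bm rm)) (r, plan) ((n:Int)+1)
        = (r - kc.2, plan.set (n+1) kc.2) := by
      unfold pvB_btStep
      rw [hrm, hbm, hdpP, hdpS, pvDpRow_getS res bm rm n r hr0 (by omega), hfind]
      show (r - kc.2, plan.set ((n:Int)+1).toNat kc.2) = (r - kc.2, plan.set (n+1) kc.2)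
      rw [show ((n:Int)+1).toNat = n + 1 from by omega]
    -- the A step
    have hAstep : pvA_btStep ((List.range t).map (pvAlRow res bm rm)) (r, plan) ((n:Int)+1)
        = (r - kc.2, plan.set (n+1) kc.2) := by
      unfold pvA_btStep
      rw [hal, pvAlRow_getS res bm rm n r hr0 (by omega), ← hkc2]
      show (r - kc.2, plan.set ((n:Int)+1).toNat kc.2) = (r - kc.2, plan.set (n+1) kc.2)
      rw [show ((n:Int)+1).toNat = n + 1 from by omega]
    rw [hAstep, hBstep]
    have hprev' : PySem.List.pyGetD (pvDpRow res bm rm n) (r - kc.2) (-1) ≠ -1 := hkprev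
    exact ih (by omega) (r - kc.2) (plan.set (n+1) kc.2) (by omega) (by omega) hprev'

-- ===== VERDICT (by name: the statement is the Claim_ definition above) =====
theorem resource_allocation_dp_spec : Claim_equal_resource_allocation_dp := by
  intro res bm rm _ hpre
  obtain ⟨hres, hne, -, -⟩ := hpre
  unfold Spec_resource_allocation_dp
  have ht : 1 ≤ bm.length := List.length_pos_of_ne_nil hne
  simp only [resource_allocation_dp, resource_allocation_dp_alt, PySem.List.pyGetD_zero]
  have h0d : ((PySem.List.pyRange 0 (res+1) 1).map (pvA_cell0 (bm.getD 0 []) (rm.getD 0 []))).map Prod.fst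
      = pvDpRow res bm rm 0 := rfl
  have h0a : ((PySem.List.pyRange 0 (res+1) 1).map (pvA_cell0 (bm.getD 0 []) (rm.getD 0 []))).map Prod.snd
      = pvAlRow res bm rm 0 := rfl
  rw [h0d, h0a, pvA_matrix res bm rm bm.length ht, pvB_matrix res bm rm bm.length]
  have hBrow : pvDpRowB res bm rm = pvDpRow res bm rm := funext (pvRow_eq res bm rm)
  rw [hBrow]
  simp only []
  have hc1 : (bm.length : Int) - 1 = ((bm.length - 1 : Nat) : Int) := by omega
  rw [hc1, PySem.List.pyGetD_natCast,
      pvGetD_map_range (pvDpRow res bm rm) bm.length (bm.length - 1) (by omega) []]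
  by_cases hfin : PySem.List.pyGetD (pvDpRow res bm rm (bm.length - 1)) res (-1) = -1
  · rw [if_pos hfin, if_pos hfin]
  · rw [if_neg hfin, if_neg hfin]
    have hget0 : ((List.range bm.length).map (pvDpRow res bm rm)).getD 0 []
        = pvDpRow res bm rm 0 := pvGetD_map_range _ bm.length 0 (by omega) []
    rw [hget0]
    congr 1
    exact pvBacktrack res bm rm bm.length hres ht (bm.length - 1) (by omega) res
      (List.replicate bm.length 0) hres le_rfl hfin
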